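-- pv_equiv track=rewrite | github.com/yuriboyka14/weird_text | functions.py | words_to_shuff
-- ===== SOURCE A (Python) =====
-- def words_to_shuff(x):
--
--     words_to_shuffle = []
--
--     for i in x:                                 #this loop is responsible for proper selection of words that should be shuffled
--         count = 0                               #the requirement: the smallest number of unique elements (letters) between first and last letter in
--         unique = []                             #the word should be equal to 2. It automaticly rejects 1, 2, and 3-letter words and  words
--         for j in range(len(i)):                 #like 'biiiig' which obviously would look exactly the same after shuffling
--             if j != 0 and j != (len(i)-1):
--                 if i[j] not in unique:
--                     count += 1
--                     unique.append(i[j])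
--         if count > 1:
--             words_to_shuffle.append(i)
--
--     return words_to_shuffle
-- ===== SOURCE B (Python) =====
-- def _varied(interior):
--     # True iff some interior letter differs from the first one
--     # (any() short-circuits, so interior[0] is never read on an empty slice)
--     return any(c != interior[0] for c in interior)
--
--
-- def words_to_shuff(x):
--     return [w for w in x if _varied(w[1:-1])]
-- ===== Notes on version B (the rewrite author's own statement) =====
-- stated objective: simpler
-- what changed: Replaces the nested index loop that builds a dedup list and counts distinct interior letters with a single-pass comprehension that keeps a word when some interior letter differs from the first interior letter; no set/counter is maintained.
import Mathlib
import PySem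

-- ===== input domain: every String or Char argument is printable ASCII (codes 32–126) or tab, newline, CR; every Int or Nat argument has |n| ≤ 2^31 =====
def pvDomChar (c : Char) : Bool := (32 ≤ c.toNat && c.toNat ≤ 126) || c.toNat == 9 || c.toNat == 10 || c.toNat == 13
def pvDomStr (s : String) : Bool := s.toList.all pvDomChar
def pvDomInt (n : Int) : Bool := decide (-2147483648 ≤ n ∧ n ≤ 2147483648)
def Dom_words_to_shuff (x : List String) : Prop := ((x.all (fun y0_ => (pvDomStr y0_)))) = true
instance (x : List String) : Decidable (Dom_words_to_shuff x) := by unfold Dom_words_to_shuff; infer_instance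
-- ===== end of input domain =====

-- B replaces A's dedup-list counting of distinct interior letters by a one-pass
-- "some interior letter differs from the first" test (objective: simpler).

-- ===== PORT A =====
def words_to_shuff (x : List String) : List String :=
  x.foldl (fun acc i =>
    let cs := i.toList
    let st :=
      (PySem.List.pyRange 0 (cs.length : Int) 1).foldl
        (fun (st : Int × List Char) j =>
          if j ≠ 0 ∧ j ≠ (cs.length : Int) - 1 then
            -- i[j]: j ∈ range(len(i)), always in range, so the default is never used
            if PySem.List.pyGetD cs j ' ' ∉ st.2 then
              (st.1 + 1, st.2 ++ [PySem.List.pyGetD cs j ' '])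
            else st
          else st)
        ((0 : Int), ([] : List Char))
    if st.1 > 1 then acc ++ [i] else acc) []

-- ===== PORT B =====
-- any(c != interior[0] for c in interior); on an empty interior `any` is False and
-- interior[0] is never read, hence the harmless headD default here.
def wtsVaried (t : List Char) : Bool :=
  t.any (fun c => decide (c ≠ t.headD ' '))

def words_to_shuff_alt (x : List String) : List String :=
  x.filter (fun w => wtsVaried (PySem.List.slice w.toList (some 1) (some (-1))))

-- ===== PRECONDITION & SPEC =====
def Spec_words_to_shuff (x : List String) (out : List String) : Prop := out = words_to_shuff_alt x
instance (x : List String) (out : List String) : Decidable (Spec_words_to_shuff x out) := by unfold Spec_words_to_shuff; infer_instance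

-- ===== CLAIM (what is proved, stated in full; the proofs are below) =====
def Claim_equal_words_to_shuff : Prop := ∀ (x : List String), Dom_words_to_shuff x → Spec_words_to_shuff x (words_to_shuff x)

-- ===== LEMMAS AND PROOFS =====

-- A's inner-loop body, named for the proofs (definitionally the port's lambda)
def wtsStep (st : Int × List Char) (c : Char) : Int × List Char :=
  if c ∉ st.2 then (st.1 + 1, st.2 ++ [c]) else st

theorem wtsFold_fst (I : List Char) (c : Int) (u : List Char) :
    (I.foldl wtsStep (c, u)).1 = c - u.length + ((I.foldl wtsStep (c, u)).2.length : Int) := by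
  induction I generalizing c u with
  | nil => simp
  | cons a I ih =>
    by_cases h : a ∈ u
    · simpa [wtsStep, h] using ih c u
    · have hstep : (a :: I).foldl wtsStep (c, u)
          = I.foldl wtsStep (c + 1, u ++ [a]) := by
        simp [wtsStep, h]
      rw [hstep, ih (c + 1) (u ++ [a])]
      simp

theorem wtsFold_mem (I : List Char) (c : Int) (u : List Char) (a : Char) :
    a ∈ (I.foldl wtsStep (c, u)).2 ↔ a ∈ u ∨ a ∈ I := by
  induction I generalizing c u with
  | nil => simp
  | cons b I ih =>
    by_cases h : b ∈ u
    · have hstep : (b :: I).foldl wtsStep (c, u) = I.foldl wtsStep (c, u) := by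
        simp [wtsStep, h]
      rw [hstep, ih]
      constructor
      · rintro (hu | hI)
        · exact Or.inl hu
        · exact Or.inr (List.mem_cons_of_mem _ hI)
      · rintro (hu | hbI)
        · exact Or.inl hu
        · rcases List.mem_cons.mp hbI with rfl | hI
          · exact Or.inl h
          · exact Or.inr hI
    · have hstep : (b :: I).foldl wtsStep (c, u)
          = I.foldl wtsStep (c + 1, u ++ [b]) := by
        simp [wtsStep, h]
      rw [hstep, ih]
      simp only [List.mem_append, List.mem_cons]
      tauto

theorem wtsFold_nodup (I : List Char) (c : Int) (u : List Char) (hu : u.Nodup) :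
    (I.foldl wtsStep (c, u)).2.Nodup := by
  induction I generalizing c u with
  | nil => simpa
  | cons b I ih =>
    by_cases h : b ∈ u
    · have hstep : (b :: I).foldl wtsStep (c, u) = I.foldl wtsStep (c, u) := by
        simp [wtsStep, h]
      rw [hstep]; exact ih c u hu
    · have hub : (u ++ [b]).Nodup := by
        simp [List.nodup_append, hu]
        exact fun a ha e => h (e ▸ ha)
      have hstep : (b :: I).foldl wtsStep (c, u)
          = I.foldl wtsStep (c + 1, u ++ [b]) := by
        simp [wtsStep, h]
      rw [hstep]; exact ih _ _ hub

theorem nodup_two_le_iff (U : List Char) (h : U.Nodup) :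
    2 ≤ U.length ↔ ∃ a ∈ U, ∃ b ∈ U, a ≠ b := by
  match U with
  | [] => simp
  | [x] => simp
  | a :: b :: t =>
    have hab : a ≠ b := by
      simp only [List.nodup_cons, List.mem_cons] at h
      exact fun e => h.1 (Or.inl e)
    constructor
    · intro _
      exact ⟨a, by simp, b, by simp, hab⟩
    · intro _
      simp only [List.length_cons]
      omega

theorem varied_iff (I : List Char) :
    wtsVaried I = true ↔ ∃ a ∈ I, ∃ b ∈ I, a ≠ b := by
  cases I with
  | nil => simp [wtsVaried]
  | cons h t =>
    simp only [wtsVaried, List.any_eq_true, List.headD_cons, decide_eq_true_eq]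
    constructor
    · rintro ⟨c, hc, hne⟩
      exact ⟨c, hc, h, by simp, hne⟩
    · rintro ⟨a, ha, b, hb, hne⟩
      by_cases hah : a = h
      · exact ⟨b, hb, fun e => hne (hah.trans e.symm)⟩
      · exact ⟨a, ha, hah⟩

-- the interior slice w[1:-1]
theorem slice_one_neg_one (xs : List Char) :
    PySem.List.slice xs (some 1) (some (-1)) = xs.tail.dropLast := by
  unfold PySem.List.slice
  simp [pysem]
  rw [← List.tail_dropLast]
  cases xs with
  | nil => simp
  | cons a l => cases l <;> simp [List.dropLast_eq_take]

theorem pyGetD_dropLast (xs : List Char) (j : Int) (h0 : 0 ≤ j)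
    (h1 : j < (xs.length : Int) - 1) (d : Char) :
    PySem.List.pyGetD xs j d = PySem.List.pyGetD xs.dropLast j d := by
  rw [PySem.List.pyGetD_of_nonneg _ _ h0, PySem.List.pyGetD_of_nonneg _ _ h0]
  rw [List.getD_eq_getElem?_getD, List.getD_eq_getElem?_getD, List.getElem?_dropLast]
  rw [if_pos (by omega)]

theorem filter_range_interior (n : Nat) :
    (PySem.List.pyRange 0 (n : Int) 1).filter
        (fun j => decide (j ≠ 0 ∧ j ≠ (n : Int) - 1))
      = PySem.List.pyRange 1 ((n : Int) - 1) 1 := by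
  match n with
  | 0 => simp [PySem.List.pyRange_one_eq_nil]
  | 1 =>
    rw [PySem.List.pyRange_one_cons (by norm_num)]
    simp [PySem.List.pyRange_one_eq_nil]
  | (m + 2) =>
    have h2 : (2 : Int) ≤ ((m + 2 : Nat) : Int) := by push_cast; omega
    rw [PySem.List.pyRange_one_cons (by omega), zero_add]
    have hsr : PySem.List.pyRange 1 ((m + 2 : Nat) : Int)
        = PySem.List.pyRange 1 (((m + 2 : Nat) : Int) - 1) ++ [((m + 2 : Nat) : Int) - 1] := by
      have h := PySem.List.pyRange_one_succ_right
        (a := (1 : Int)) (b := ((m + 2 : Nat) : Int) - 1) (by omega)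
      rw [sub_add_cancel] at h
      exact h
    rw [hsr, List.filter_cons, List.filter_append]
    have hmid : (PySem.List.pyRange 1 (((m + 2 : Nat) : Int) - 1)).filter
        (fun j => decide (j ≠ 0 ∧ j ≠ ((m + 2 : Nat) : Int) - 1))
        = PySem.List.pyRange 1 (((m + 2 : Nat) : Int) - 1) := by
      rw [List.filter_eq_self]
      intro j hj
      rw [PySem.List.mem_pyRange_one] at hj
      simp only [decide_eq_true_eq, ne_eq]
      omega
    rw [hmid]
    simp

theorem innerA_eq (cs : List Char) :
    (PySem.List.pyRange 0 (cs.length : Int) 1).foldl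
      (fun st j => if j ≠ 0 ∧ j ≠ (cs.length : Int) - 1
        then wtsStep st (PySem.List.pyGetD cs j ' ') else st)
      ((0 : Int), ([] : List Char))
    = (cs.tail.dropLast).foldl wtsStep ((0 : Int), ([] : List Char)) := by
  rw [PySem.List.foldl_ite_eq_foldl_filter
        (fun j => j ≠ 0 ∧ j ≠ (cs.length : Int) - 1)
        (fun st j => wtsStep st (PySem.List.pyGetD cs j ' '))]
  rw [filter_range_interior cs.length]
  match cs with
  | [] => simp [PySem.List.pyRange_one_eq_nil]
  | a :: l =>
    have hlen : ((a :: l).length : Int) - 1 = ((a :: l).dropLast.length : Int) := by simp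
    rw [hlen]
    have hcong := PySem.List.foldl_congr_mem
      (PySem.List.pyRange 1 (((a :: l).dropLast.length : Int)) 1)
      (fun st j => wtsStep st (PySem.List.pyGetD (a :: l) j ' '))
      (fun st j => wtsStep st (PySem.List.pyGetD (a :: l).dropLast j ' '))
      ((0 : Int), ([] : List Char))
      (by
        intro acc j hj
        rw [PySem.List.mem_pyRange_one] at hj
        have hj2 : j < ((a :: l).length : Int) - 1 := by
          simp only [List.length_dropLast, List.length_cons] at hj ⊢
          push_cast at hj ⊢
          omega
        show wtsStep acc (PySem.List.pyGetD (a :: l) j ' ')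
            = wtsStep acc (PySem.List.pyGetD (a :: l).dropLast j ' ')
        rw [pyGetD_dropLast _ _ (by omega) hj2])
    rw [hcong]
    rw [PySem.List.foldl_pyRange_pyGetD' (a :: l).dropLast ' ' wtsStep _ (by norm_num : (0 : Int) ≤ 1)]
    norm_num
    rw [List.tail_dropLast]
    simp

theorem perWord (cs : List Char) :
    (((PySem.List.pyRange 0 (cs.length : Int) 1).foldl
      (fun st j => if j ≠ 0 ∧ j ≠ (cs.length : Int) - 1
        then wtsStep st (PySem.List.pyGetD cs j ' ') else st)
      ((0 : Int), ([] : List Char))).1 > 1)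
    ↔ wtsVaried (PySem.List.slice cs (some 1) (some (-1))) = true := by
  rw [innerA_eq, slice_one_neg_one]
  set I := cs.tail.dropLast with hI
  have hfst := wtsFold_fst I 0 []
  have hmem := wtsFold_mem I 0 []
  have hnd := wtsFold_nodup I 0 [] (by simp)
  rw [varied_iff]
  simp only [List.length_nil, Nat.cast_zero, sub_zero, zero_add] at hfst
  rw [hfst]
  have h2 := nodup_two_le_iff _ hnd
  constructor
  · intro h
    obtain ⟨a, ha, b, hb, hne⟩ := h2.mp (by omega)
    exact ⟨a, ((hmem a).mp ha).resolve_left (by simp),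
           b, ((hmem b).mp hb).resolve_left (by simp), hne⟩
  · rintro ⟨a, ha, b, hb, hne⟩
    have := h2.mpr ⟨a, (hmem a).mpr (Or.inr ha), b, (hmem b).mpr (Or.inr hb), hne⟩
    omega

-- ===== VERDICT (by name: the statement is the Claim_ definition above) =====
theorem words_to_shuff_spec : Claim_equal_words_to_shuff := by
  intro x _
  unfold Spec_words_to_shuff words_to_shuff words_to_shuff_alt
  show x.foldl (fun acc i =>
      if (((PySem.List.pyRange 0 ((i.toList).length : Int) 1).foldl
        (fun st j => if j ≠ 0 ∧ j ≠ ((i.toList).length : Int) - 1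
          then wtsStep st (PySem.List.pyGetD i.toList j ' ') else st)
        ((0 : Int), ([] : List Char))).1 > 1)
      then acc ++ [i] else acc) [] = _
  rw [PySem.List.foldl_append_ite_eq_filter]
  rw [List.nil_append]
  apply List.filter_congr
  intro w _
  rw [Bool.eq_iff_iff]
  simp only [decide_eq_true_eq]
  exact perWord w.toList
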